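-- pv_equiv track=rewrite | github.com/cuthbertLab/music21 | music21/meter/tools.py | divisionOptionsFractionsDownward
-- ===== SOURCE A (Python) =====
-- NumDenom = tuple[int, int]
--
-- validDenominators = [1, 2, 4, 8, 16, 32, 64, 128]  # in order
--
-- def divisionOptionsFractionsDownward(n: int, d: int) -> tuple[NumDenom, ...]:
--     '''
--     Get restatements of the same fraction in larger units
--
--     >>> meter.tools.divisionOptionsFractionsDownward(2, 4)
--     ((1, 2),)
--     >>> meter.tools.divisionOptionsFractionsDownward(12, 16)
--     ((6, 8), (3, 4))
--
--     * Changed in v9: returns a tuple of NumDenom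
--     '''
--     opts: list[NumDenom] = []
--     if d > validDenominators[0] and n % 2 == 0:
--         nMod = n // 2
--         dMod = d // 2
--         while True:
--             if dMod < validDenominators[0]:
--                 break
--             opts.append((nMod, dMod))
--             if nMod % 2 != 0:  # no longer even
--                 break
--             dMod = dMod // 2
--             nMod = nMod // 2
--     return tuple(opts)
-- ===== SOURCE B (Python) =====
-- def _tz(m):
--     """Number of trailing zero bits of a positive integer."""
--     k = 0
--     while m % 2 == 0:
--         m //= 2
--         k += 1
--     return k
--
--
-- def divisionOptionsFractionsDownward(n: int, d: int) -> tuple: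
--     if d <= 1 or n % 2 != 0:
--         return ()
--     maxShift = d.bit_length() - 1          # halvings before d reaches 0
--     nShift = maxShift if n == 0 else _tz(abs(n))
--     K = min(nShift, maxShift)
--     return tuple((n // 2 ** k, d // 2 ** k) for k in range(1, K + 1))
-- ===== Notes on version B (the rewrite author's own statement) =====
-- stated objective: alternative
-- what changed: Replaces the stateful halving while-loop with a closed-form count: the number of restatements is min(trailing zeros of n, bit_length(d)-1), and the result is built in one shot as (n//2^k, d//2^k) for k = 1..K.
import Mathlib
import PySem

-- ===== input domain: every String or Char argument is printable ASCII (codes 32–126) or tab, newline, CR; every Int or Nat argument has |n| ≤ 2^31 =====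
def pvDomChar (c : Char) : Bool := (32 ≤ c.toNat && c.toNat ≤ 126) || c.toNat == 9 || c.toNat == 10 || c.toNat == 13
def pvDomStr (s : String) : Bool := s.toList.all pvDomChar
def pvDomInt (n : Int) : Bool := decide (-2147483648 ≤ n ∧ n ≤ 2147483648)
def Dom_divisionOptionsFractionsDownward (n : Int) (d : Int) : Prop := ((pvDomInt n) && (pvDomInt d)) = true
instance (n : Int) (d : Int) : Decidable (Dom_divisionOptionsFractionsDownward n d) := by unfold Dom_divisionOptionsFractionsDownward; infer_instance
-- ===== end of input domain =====

-- B replaces A's stateful halving while-loop by a closed-form count of the possible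
-- restatements (min of n's trailing zero bits and bit_length(d)-1) and builds the
-- whole list in one shot; same asymptotic cost (objective: alternative).

-- ===== PORT A =====
-- A's `while True` loop; `validDenominators[0]` is the literal 1
def loopA (nMod : Int) (dMod : Int) : List (Int × Int) :=
  if dMod < 1 then []
  else
    (nMod, dMod) ::
      (if PySem.Int.mod nMod 2 ≠ 0 then []
       else loopA (PySem.Int.floordiv nMod 2) (PySem.Int.floordiv dMod 2))
termination_by dMod.toNat
decreasing_by
  have h2 : PySem.Int.floordiv dMod 2 = dMod / 2 :=
    PySem.Int.floordiv_eq_ediv_of_pos (by omega)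
  rw [h2]; omega

def divisionOptionsFractionsDownward (n : Int) (d : Int) : List (Int × Int) :=
  if 1 < d ∧ PySem.Int.mod n 2 = 0 then
    loopA (PySem.Int.floordiv n 2) (PySem.Int.floordiv d 2)
  else []

-- ===== PORT B =====
-- Source B's _tz: trailing zero bits of a positive integer (the m ≠ 0 test only makes it total)
def tzNat (m : Nat) : Nat :=
  if m ≠ 0 ∧ m % 2 = 0 then tzNat (m / 2) + 1 else 0
termination_by m
decreasing_by omega

def divisionOptionsFractionsDownward_alt (n : Int) (d : Int) : List (Int × Int) :=
  if d ≤ 1 ∨ PySem.Int.mod n 2 ≠ 0 then []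
  else
    let maxShift : Nat := PySem.Int.bitLength d - 1
    let nShift : Nat := if n = 0 then maxShift else tzNat n.natAbs
    let K : Nat := min nShift maxShift
    (PySem.List.pyRange 1 ((K : Int) + 1) 1).map
      (fun k => (PySem.Int.floordiv n (2 ^ k.toNat), PySem.Int.floordiv d (2 ^ k.toNat)))

-- ===== PRECONDITION & SPEC =====
def Spec_divisionOptionsFractionsDownward (n : Int) (d : Int) (out : List (Int × Int)) : Prop := out = divisionOptionsFractionsDownward_alt n d
instance (n : Int) (d : Int) (out : List (Int × Int)) : Decidable (Spec_divisionOptionsFractionsDownward n d out) := by unfold Spec_divisionOptionsFractionsDownward; infer_instance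

-- ===== CLAIM (what is proved, stated in full; the proofs are below) =====
def Claim_equal_divisionOptionsFractionsDownward : Prop := ∀ (n : Int) (d : Int), Dom_divisionOptionsFractionsDownward n d → Spec_divisionOptionsFractionsDownward n d (divisionOptionsFractionsDownward n d)

-- ===== LEMMAS AND PROOFS =====

-- closed-form number of restatements (B's K, written as a function)
def Kfun (n : Int) (d : Int) : Nat :=
  min (if n = 0 then PySem.Int.bitLength d - 1 else tzNat n.natAbs) (PySem.Int.bitLength d - 1)

lemma pyRange_map_bridge {α : Type} (K : Nat) (f : Int → α) :
    (PySem.List.pyRange 1 ((K : Int) + 1) 1).map f = (List.range K).map (fun (j : Nat) => f ((j : Int) + 1)) := by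
  rw [PySem.List.pyRange_one]
  have h : ((K : Int) + 1 - 1).toNat = K := by omega
  rw [h, List.map_map]
  exact List.map_congr_left (fun j _ => by simp [add_comm])

lemma floordiv_floordiv (a : Int) (k : Nat) :
    PySem.Int.floordiv (PySem.Int.floordiv a 2) (2 ^ k) = PySem.Int.floordiv a (2 ^ (k + 1)) := by
  rw [PySem.Int.floordiv_eq_ediv_of_pos (a := a) (by omega : (0:Int) < 2),
      PySem.Int.floordiv_eq_ediv_of_pos (by positivity : (0:Int) < (2:Int) ^ k),
      PySem.Int.floordiv_eq_ediv_of_pos (by positivity : (0:Int) < (2:Int) ^ (k + 1)),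
      Int.ediv_ediv_of_nonneg (by omega)]
  ring_nf

lemma bitLength_two_le {d : Int} (hd : 1 < d) : 2 ≤ PySem.Int.bitLength d := by
  have h1 : PySem.Int.bitLength d = PySem.Int.bitLength (PySem.Int.floordiv d 2) + 1 :=
    PySem.Int.bitLength_of_pos (by omega)
  have hpos : 0 < PySem.Int.floordiv d 2 := by
    rw [PySem.Int.floordiv_eq_ediv_of_pos (by omega : (0:Int) < 2)]; omega
  have h2 : PySem.Int.bitLength (PySem.Int.floordiv d 2)
      = PySem.Int.bitLength (PySem.Int.floordiv (PySem.Int.floordiv d 2) 2) + 1 :=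
    PySem.Int.bitLength_of_pos hpos
  omega

lemma tz_step {n : Int} (hn : n ≠ 0) (he : PySem.Int.mod n 2 = 0) :
    tzNat n.natAbs = tzNat (PySem.Int.floordiv n 2).natAbs + 1 := by
  obtain ⟨m, rfl⟩ := (PySem.Int.mod_eq_zero_iff_dvd n 2).mp he
  have hm : m ≠ 0 := by rintro rfl; simp at hn
  have hfd : PySem.Int.floordiv (2 * m) 2 = m := by
    rw [PySem.Int.floordiv_eq_ediv_of_pos (by omega : (0:Int) < 2)]; omega
  have habs : (2 * m).natAbs = 2 * m.natAbs := by omega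
  have hdiv : 2 * m.natAbs / 2 = m.natAbs := by omega
  rw [hfd, habs, tzNat.eq_def, if_pos (by omega : 2 * m.natAbs ≠ 0 ∧ 2 * m.natAbs % 2 = 0), hdiv]

lemma loopA_eq_range (D : Nat) : ∀ (d n : Int), d.toNat ≤ D → 1 < d → PySem.Int.mod n 2 = 0 →
    loopA (PySem.Int.floordiv n 2) (PySem.Int.floordiv d 2) =
      (List.range (Kfun n d)).map
        (fun j => (PySem.Int.floordiv n (2 ^ (j + 1)), PySem.Int.floordiv d (2 ^ (j + 1)))) := by
  induction D with
  | zero => intro d n hD hd he; omega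
  | succ D ih =>
    intro d n hD hd he
    have hd'e : PySem.Int.floordiv d 2 = d / 2 :=
      PySem.Int.floordiv_eq_ediv_of_pos (by omega : (0:Int) < 2)
    have hn'e : PySem.Int.floordiv n 2 = n / 2 :=
      PySem.Int.floordiv_eq_ediv_of_pos (by omega : (0:Int) < 2)
    have hbl2 : 2 ≤ PySem.Int.bitLength d := bitLength_two_le hd
    have hblstep : PySem.Int.bitLength d = PySem.Int.bitLength (PySem.Int.floordiv d 2) + 1 :=
      PySem.Int.bitLength_of_pos (by omega)
    rw [loopA.eq_def, if_neg (by omega)]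
    by_cases hodd : PySem.Int.mod (PySem.Int.floordiv n 2) 2 ≠ 0
    · -- n//2 odd: exactly one restatement
      rw [if_pos hodd]
      have hnz : n ≠ 0 := by
        rintro rfl
        rw [hn'e] at hodd
        simp [PySem.Int.mod] at hodd
      have hK : Kfun n d = 1 := by
        have h1 : tzNat n.natAbs = tzNat (PySem.Int.floordiv n 2).natAbs + 1 := tz_step hnz he
        have h0 : tzNat (PySem.Int.floordiv n 2).natAbs = 0 := by
          rw [PySem.Int.mod_eq_emod_of_pos (by omega : (0:Int) < 2)] at hodd
          rw [tzNat.eq_def, if_neg (by omega)]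
        simp only [Kfun, if_neg hnz]
        rw [h1, h0]
        omega
      rw [hK]
      simp
    · push Not at hodd
      rw [if_neg (by simpa using hodd)]
      by_cases hd'2 : 1 < PySem.Int.floordiv d 2
      · -- recurse via the IH at (n//2, d//2)
        rw [ih (PySem.Int.floordiv d 2) (PySem.Int.floordiv n 2) (by omega) hd'2 hodd]
        have hbl2' : 2 ≤ PySem.Int.bitLength (PySem.Int.floordiv d 2) := bitLength_two_le hd'2
        have hK : Kfun n d = Kfun (PySem.Int.floordiv n 2) (PySem.Int.floordiv d 2) + 1 := by
          by_cases hz : n = 0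
          · have hz' : PySem.Int.floordiv n 2 = 0 := by rw [hn'e, hz]; rfl
            simp only [Kfun, if_pos hz, if_pos hz', hblstep]
            omega
          · have hz' : PySem.Int.floordiv n 2 ≠ 0 := by
              intro h0
              rw [PySem.Int.mod_eq_emod_of_pos (by omega : (0:Int) < 2)] at he
              omega
            simp only [Kfun, if_neg hz, if_neg hz']
            rw [tz_step hz he, hblstep]
            omega
        rw [hK, List.range_succ_eq_map, List.map_cons, List.map_map]
        refine List.cons_eq_cons.mpr ⟨by simp, ?_⟩
        refine List.map_congr_left (fun j _ => ?_)
        simp only [Function.comp]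
        rw [floordiv_floordiv n (j + 1), floordiv_floordiv d (j + 1)]
      · -- d//2 = 1 (d is 2 or 3): recursion stops because (d//2)//2 = 0
        have hd'eq : PySem.Int.floordiv d 2 = 1 := by omega
        rw [loopA.eq_def, if_pos (by rw [hd'eq]; decide)]
        have hK : Kfun n d = 1 := by
          have hbl : PySem.Int.bitLength d = 2 := by
            rw [hblstep, hd'eq]; decide
          by_cases hz : n = 0
          · simp only [Kfun, if_pos hz, hbl]
            omega
          · have h1 := tz_step hz he
            simp only [Kfun, if_neg hz]
            rw [h1, hbl]
            omega
        rw [hK]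
        simp

-- ===== VERDICT (by name: the statement is the Claim_ definition above) =====
theorem divisionOptionsFractionsDownward_spec : Claim_equal_divisionOptionsFractionsDownward := by
  intro n d _
  unfold Spec_divisionOptionsFractionsDownward divisionOptionsFractionsDownward divisionOptionsFractionsDownward_alt
  by_cases hg : 1 < d ∧ PySem.Int.mod n 2 = 0
  · obtain ⟨hd, he⟩ := hg
    rw [if_pos ⟨hd, he⟩, if_neg (by push Not; exact ⟨by omega, he⟩)]
    show loopA _ _ = (PySem.List.pyRange 1 ((Kfun n d : Int) + 1) 1).map
      (fun k => (PySem.Int.floordiv n (2 ^ k.toNat), PySem.Int.floordiv d (2 ^ k.toNat)))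
    rw [pyRange_map_bridge, loopA_eq_range d.toNat d n le_rfl hd he]
    refine List.map_congr_left (fun j _ => ?_)
    have h : ((j : Int) + 1).toNat = j + 1 := by omega
    rw [h]
  · rw [if_neg hg, if_pos (show d ≤ 1 ∨ PySem.Int.mod n 2 ≠ 0 by
      by_cases h : 1 < d
      · exact Or.inr fun hm => hg ⟨h, hm⟩
      · exact Or.inl (by omega))]
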